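-- pv_equiv track=rewrite | github.com/chazzhou/biasexaminer | bias-frontend/src/Solutions.py | solution
-- ===== SOURCE A (Python) =====
-- from collections import Counter
--
-- def solution(S):
--     vowels = set("aeiouy")
--     letters = Counter(l for l in S.lower() if l in vowels)
--     output = letters.most_common()
--     final_lst = max_values(output) #Helper function used to find max vowels
--     s = ""
--     count = 0
--     #Formatting for return value
--     for i in final_lst:
--         if len(final_lst) == 1 or count == len(final_lst) - 1:
--             s = (s + str(i[0]) + " appears " + str(i[1]) + " time(s)")
--         else:
--             s = s = (s + str(i[0]) + " appears " + str(i[1]) + " time(s)" + "\n")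
--         count = count + 1
--     return s
--
-- def max_values(output):
--     m = 0
--     for i in output:
--         if i[1] > m:
--             m = i[1]
--     final_lst = []
--     for i in output:
--         if i[1] == m:
--             final_lst.append(i)
--     #final_lst.reverse()
--     final_lst.sort(key = lambda y: y[0])
--     return final_lst
-- ===== SOURCE B (Python) =====
-- def solution(S):
--     s = S.lower()
--     counts = [(v, s.count(v)) for v in "aeiouy" if s.count(v) > 0]
--     if not counts:
--         return ""
--     m = max(c for _, c in counts)
--     return "\n".join(f"{v} appears {c} time(s)" for v, c in counts if c == m)
-- ===== Notes on version B (the rewrite author's own statement) =====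
-- stated objective: simpler
-- what changed: Replaces the Counter-over-a-filtered-stream, most_common sort, separate running-max/collect loops and final key-sort of A by one comprehension that counts each of the six vowels in the lowered string via str.count over the already-alphabetical vowel literal (so no sorting at all), takes the max of those counts, and joins the tied vowels with a newline.
import Mathlib
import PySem

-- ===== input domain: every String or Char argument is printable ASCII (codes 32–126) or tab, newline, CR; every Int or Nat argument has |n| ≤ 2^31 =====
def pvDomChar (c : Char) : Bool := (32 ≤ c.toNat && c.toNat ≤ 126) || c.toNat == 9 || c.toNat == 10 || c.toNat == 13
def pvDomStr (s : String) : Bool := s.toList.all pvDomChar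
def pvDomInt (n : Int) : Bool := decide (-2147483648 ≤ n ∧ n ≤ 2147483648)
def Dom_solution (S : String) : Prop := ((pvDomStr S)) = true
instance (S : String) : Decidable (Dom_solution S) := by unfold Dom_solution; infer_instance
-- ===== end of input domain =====

-- A = find the most frequent vowels of S and format a report; B replaces Counter/most_common/max_values
-- by per-vowel counts over the already-alphabetical literal "aeiouy" (no sorting) — objective: simpler.


-- the exact report line "<v> appears <c> time(s)" (both Pythons build this same text)
def pvLine (v : Char) (c : Int) : String :=
  String.singleton v ++ " appears " ++ PySem.Int.toStr c ++ " time(s)"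

-- ===== PORT A =====
-- helper max_values(output): running max m, collect entries with count m, sort by letter
def pvMaxValues (output : List (Char × Int)) : List (Char × Int) :=
  let m := output.foldl (fun m i => if i.2 > m then i.2 else m) 0
  let finalLst := output.foldl (fun acc i => if i.2 = m then acc ++ [i] else acc) []
  PySem.List.sorted finalLst (fun y => y.1)

def solution (S : String) : String :=
  let vowels : PySem.Set Char := PySem.Set.ofList "aeiouy".toList
  let letters := PySem.Dict.counter ((PySem.Str.lower S).toList.filter (fun l => vowels.contains l))
  let output := PySem.List.sorted letters.items (fun i => i.2) true   -- letters.most_common()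
  let finalLst := pvMaxValues output
  -- formatting loop: state (s, count); last element gets no trailing "\n"
  (finalLst.foldl (fun st i =>
      (if finalLst.length = 1 ∨ st.2 = (finalLst.length : Int) - 1
       then st.1 ++ pvLine i.1 i.2
       else st.1 ++ pvLine i.1 i.2 ++ "\n", st.2 + 1)) (("", 0) : String × Int)).1

-- ===== PORT B =====
def solution_alt (S : String) : String :=
  let s := PySem.Str.lower S
  let counts := ("aeiouy".toList.filter (fun v => 0 < PySem.Str.count s (String.singleton v))).map
      (fun v => (v, (PySem.Str.count s (String.singleton v) : Int)))
  if counts.isEmpty then ""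
  else
    let m := PySem.List.maxD (counts.map (fun p => p.2)) (fun c => c) 0  -- max(c for _, c in counts)
    PySem.Str.join "\n" ((counts.filter (fun p => p.2 == m)).map (fun p => pvLine p.1 p.2))

-- ===== PRECONDITION & SPEC =====
def Spec_solution (S : String) (out : String) : Prop := out = solution_alt S
instance (S : String) (out : String) : Decidable (Spec_solution S out) := by unfold Spec_solution; infer_instance

-- ===== CLAIM (what is proved, stated in full; the proofs are below) =====
def Claim_equal_solution : Prop := ∀ (S : String), Dom_solution S → Spec_solution S (solution S)

-- ===== LEMMAS AND PROOFS =====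

-- s.count of a single character is the character count of the list
theorem pv_count_go_singleton (c : Char) : ∀ (fuel : Nat) (l : List Char) (acc : Nat), l.length ≤ fuel →
    PySem.Chars.count.go [c] fuel l acc = acc + l.count c := by
  intro fuel
  induction fuel with
  | zero => intro l acc h; cases l with
    | nil => simp [PySem.Chars.count.go]
    | cons x t => simp at h
  | succ n ih => intro l acc h; cases l with
    | nil => simp [PySem.Chars.count.go]
    | cons x t =>
      simp only [PySem.Chars.count.go]
      by_cases hx : x = c
      · subst hx
        simp [List.isPrefixOf, ih t _ (by simpa using h)]
        omega
      · simp [List.isPrefixOf, hx, ih t _ (by simpa using h)]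
        exact fun h' => hx h'.symm

theorem pv_strcount_singleton (s : String) (c : Char) :
    PySem.Str.count s (String.singleton c) = s.toList.count c := by
  rw [PySem.Str.count_eq]
  have : (String.singleton c).toList = [c] := by simp
  rw [this]
  simp only [PySem.Chars.count, List.isEmpty]
  simpa using pv_count_go_singleton c s.length s.toList 0 (by simp)

-- B's counts list, in terms of the lowered character list
def pvC (L : List Char) : List (Char × Int) :=
  ("aeiouy".toList.filter (fun v => 0 < L.count v)).map (fun v => (v, (L.count v : Int)))

theorem pv_counts_eq (S : String) :
    (("aeiouy".toList.filter (fun v => 0 < PySem.Str.count (PySem.Str.lower S) (String.singleton v))).map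
      (fun v => (v, (PySem.Str.count (PySem.Str.lower S) (String.singleton v) : Int))))
      = pvC (PySem.Str.lower S).toList := by
  simp only [pvC, pv_strcount_singleton]

-- A's counter items are a permutation of B's counts list
theorem pv_items_perm (L : List Char) :
    (PySem.Dict.counter (L.filter (fun l => (PySem.Set.ofList "aeiouy".toList).contains l))).items.Perm (pvC L) := by
  rw [PySem.Dict.items_counter]
  have hmemF : ∀ x : Char, x ∈ L.filter (fun l => (PySem.Set.ofList "aeiouy".toList).contains l) ↔
      x ∈ L ∧ x ∈ "aeiouy".toList := by
    intro x
    simp [List.mem_filter, PySem.Set.mem_ofList]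
  have hcnt : ∀ v ∈ PySem.Set.ofList (L.filter (fun l => (PySem.Set.ofList "aeiouy".toList).contains l)),
      (L.filter (fun l => (PySem.Set.ofList "aeiouy".toList).contains l)).count v = L.count v := by
    intro v hv
    rw [PySem.Set.mem_ofList, hmemF] at hv
    refine List.count_filter ?_
    have := hv.2
    simp [PySem.Set.mem_ofList]
    simpa using this
  rw [List.map_congr_left (l := PySem.Set.ofList (L.filter (fun l => (PySem.Set.ofList "aeiouy".toList).contains l)))
      (g := fun k => (k, (L.count k : Int))) (fun a ha => by rw [hcnt a ha])]
  unfold pvC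
  refine List.Perm.map _ ?_
  refine (List.perm_ext_iff_of_nodup (PySem.Set.nodup_ofList _) ((by decide : ("aeiouy".toList : List Char).Nodup).filter _)).mpr ?_
  intro x
  rw [PySem.Set.mem_ofList, hmemF, List.mem_filter]
  constructor
  · rintro ⟨hxL, hxv⟩; exact ⟨hxv, by simpa using List.count_pos_iff.mpr hxL⟩
  · rintro ⟨hxv, hc⟩; exact ⟨List.count_pos_iff.mp (by simpa using hc), hxv⟩

-- max? over a nonempty list is A's running max from the head
theorem pv_foldl_max_some : ∀ (l : List Int) (a : Int),
    PySem.List.max? (a :: l) (fun y => y) = some (l.foldl (fun m x => if x > m then x else m) a) := by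
  intro l
  induction l with
  | nil => intro a; rfl
  | cons x t ih =>
    intro a
    by_cases h : a < x
    · have e1 : PySem.List.max? (a :: x :: t) (fun y : Int => y)
          = PySem.List.max? (x :: t) (fun y : Int => y) := by
        simp [PySem.List.max?, h]
      rw [e1, ih, List.foldl_cons, if_pos (show x > a from h)]
    · have e1 : PySem.List.max? (a :: x :: t) (fun y : Int => y)
          = PySem.List.max? (a :: t) (fun y : Int => y) := by
        simp [PySem.List.max?, h]
      rw [e1, ih, List.foldl_cons, if_neg (show ¬ x > a from h)]

-- A's running max over any permutation of pvC equals B's maxD over pvC's counts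
theorem pv_max_eq (L : List Char) (o : List (Char × Int)) (hp : o.Perm (pvC L)) :
    o.foldl (fun m i => if i.2 > m then i.2 else m) 0
      = PySem.List.maxD ((pvC L).map (fun p => p.2)) (fun c => c) 0 := by
  have hstep : ∀ (l : List Int) (a : Int), l.foldl (fun m x => if x > m then x else m) a = l.foldl max a := by
    intro l
    induction l with
    | nil => intro a; rfl
    | cons x t ih =>
      intro a
      simp only [List.foldl_cons, ih]
      congr 1
      by_cases h : a < x
      · rw [if_pos h, max_eq_right h.le]
      · rw [if_neg h, max_eq_left (le_of_not_gt h)]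
  have h1 : o.foldl (fun m i => if i.2 > m then i.2 else m) 0
      = ((pvC L).map (fun p => p.2)).foldl max 0 := by
    calc o.foldl (fun m i => if i.2 > m then i.2 else m) 0
        = (o.map (fun p => p.2)).foldl (fun m x => if x > m then x else m) 0 :=
          (List.foldl_map (f := fun (p : Char × Int) => p.2) (g := fun (m x : Int) => if x > m then x else m)).symm
      _ = (o.map (fun p => p.2)).foldl max 0 := hstep _ _
      _ = ((pvC L).map (fun p => p.2)).foldl max 0 := (hp.map (fun p => p.2)).foldl_op_eq
  rw [h1]
  have hpos : ∀ x ∈ (pvC L).map (fun p => p.2), 0 < x := by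
    intro x hx
    simp only [pvC, List.map_map, List.mem_map, List.mem_filter] at hx
    obtain ⟨v, ⟨_, hv⟩, rfl⟩ := hx
    simpa using hv
  cases hc : (pvC L).map (fun p => p.2) with
  | nil => rfl
  | cons c t =>
    have hcpos : 0 < c := hpos c (by rw [hc]; exact List.mem_cons_self)
    have h2 : PySem.List.max? (c :: t) (fun y => y)
        = some (t.foldl (fun m x => if x > m then x else m) c) := pv_foldl_max_some t c
    unfold PySem.List.maxD
    rw [h2, Option.getD_some, List.foldl_cons, max_eq_right hcpos.le]
    exact (hstep t c).symm

-- the filtered-to-max entries of A are exactly B's filtered counts, already letter-sorted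
theorem pv_final_eq (L : List Char) (o : List (Char × Int)) (hp : o.Perm (pvC L)) (m : Int) :
    PySem.List.sorted (o.foldl (fun acc i => if i.2 = m then acc ++ [i] else acc) []) (fun y => y.1)
      = (pvC L).filter (fun p => p.2 == m) := by
  have hfold : o.foldl (fun acc i => if i.2 = m then acc ++ [i] else acc) []
      = o.filter (fun i => i.2 == m) := by
    rw [PySem.List.foldl_congr_mem o _
        (fun acc (i : Char × Int) => if (i.2 == m) = true then acc ++ [id i] else acc) []
        (fun acc x _ => by by_cases hx : x.2 = m <;> simp [hx]),
      PySem.List.foldl_append_if]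
    simp
  rw [hfold]
  apply PySem.List.sorted_eq_of_perm_of_pairwise_lt
  · exact (hp.filter _).symm
  · refine List.Pairwise.filter _ ?_
    unfold pvC
    rw [List.pairwise_map]
    exact List.Pairwise.filter _ (by decide : ("aeiouy".toList).Pairwise (· < ·))

-- A's formatting loop, generalized over the running count and accumulator
theorem pv_format_aux (n : Nat) :
    ∀ (t : List (Char × Int)) (k : Int) (acc : String), t ≠ [] → k + t.length = (n : Int) → 0 ≤ k →
    (t.foldl (fun st i =>
      (if n = 1 ∨ st.2 = (n : Int) - 1
       then st.1 ++ pvLine i.1 i.2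
       else st.1 ++ pvLine i.1 i.2 ++ "\n", st.2 + 1)) ((acc, k) : String × Int)).1
      = acc ++ PySem.Str.join "\n" (t.map (fun p => pvLine p.1 p.2)) := by
  intro t
  induction t with
  | nil => intro k acc h _ _; exact absurd rfl h
  | cons i t ih =>
    intro k acc _ hk hk0
    cases t with
    | nil =>
      have hcond : n = 1 ∨ k = (n : Int) - 1 := Or.inr (by
        simp only [List.length_cons, List.length_nil] at hk; push_cast at hk; omega)
      simp only [List.foldl_cons, List.foldl_nil, List.map_cons, List.map_nil]
      rw [if_pos hcond]
      have hjoin : PySem.Str.join "\n" [pvLine i.1 i.2] = pvLine i.1 i.2 := by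
        apply String.toList_inj.mp
        rw [PySem.Str.toList_join]
        simp [PySem.Chars.join_singleton]
      rw [hjoin]
    | cons j t' =>
      have hcond : ¬ (n = 1 ∨ k = (n : Int) - 1) := by
        simp only [List.length_cons] at hk
        push_cast at hk
        rintro (h1 | h2) <;> omega
      simp only [List.foldl_cons]
      rw [if_neg hcond]
      have hrec := ih (k + 1) (acc ++ pvLine i.1 i.2 ++ "\n") (by simp)
        (by simp only [List.length_cons] at hk ⊢; push_cast at hk ⊢; omega) (by omega)
      simp only [List.foldl_cons] at hrec
      rw [hrec]
      apply String.toList_inj.mp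
      simp [PySem.Str.toList_join, String.toList_append, PySem.Chars.join_cons_cons]

-- A's formatting loop is join "\n" over the lines
theorem pv_format_eq (l : List (Char × Int)) (hne : l ≠ []) :
    (l.foldl (fun st i =>
      (if l.length = 1 ∨ st.2 = (l.length : Int) - 1
       then st.1 ++ pvLine i.1 i.2
       else st.1 ++ pvLine i.1 i.2 ++ "\n", st.2 + 1)) (("", 0) : String × Int)).1
      = PySem.Str.join "\n" (l.map (fun p => pvLine p.1 p.2)) := by
  have := pv_format_aux l.length l 0 "" hne (by omega) le_rfl
  rw [this]
  apply String.toList_inj.mp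
  simp

-- ===== VERDICT (by name: the statement is the Claim_ definition above) =====
theorem solution_spec : Claim_equal_solution := by
  intro S _
  unfold Spec_solution solution solution_alt pvMaxValues
  simp only [pv_counts_eq S]
  have houtput : (PySem.List.sorted
      (PySem.Dict.counter
        (List.filter (fun l => (PySem.Set.ofList "aeiouy".toList).contains l)
          (PySem.Str.lower S).toList)).items (fun i => i.2) true).Perm (pvC (PySem.Str.lower S).toList) :=
    (PySem.List.sorted_perm _ _ _).trans (pv_items_perm (PySem.Str.lower S).toList)
  rw [pv_max_eq (PySem.Str.lower S).toList _ houtput,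
      pv_final_eq (PySem.Str.lower S).toList _ houtput]
  by_cases hE : pvC (PySem.Str.lower S).toList = []
  · have hE' : pvC (PySem.Chars.lower S.toList) = [] := by simpa using hE
    simp [hE']
  · rw [if_neg (by simpa using hE)]
    refine pv_format_eq _ ?_
    obtain ⟨c, t, hc⟩ : ∃ c t, (pvC (PySem.Str.lower S).toList).map (fun p => p.2) = c :: t := by
      cases hmap : (pvC (PySem.Str.lower S).toList).map (fun p => p.2) with
      | nil => exact absurd (List.map_eq_nil_iff.mp hmap) hE
      | cons c t => exact ⟨c, t, rfl⟩
    have hmem : PySem.List.maxD ((pvC (PySem.Str.lower S).toList).map (fun p => p.2)) (fun c => c) 0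
        ∈ (pvC (PySem.Str.lower S).toList).map (fun p => p.2) := by
      rw [hc]
      unfold PySem.List.maxD
      rw [pv_foldl_max_some t c, Option.getD_some]
      exact PySem.List.max?_mem (pv_foldl_max_some t c)
    obtain ⟨p, hpmem, hp2⟩ := List.mem_map.mp hmem
    exact List.ne_nil_of_mem (List.mem_filter.mpr ⟨hpmem, by simp [hp2]⟩)
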